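-- pv_equiv track=rewrite | github.com/Rilwan-Adewoyin/CPUQ | prompt_engineering/utils_prompteng.py | map_llmname_input_format
-- ===== SOURCE A (Python) =====
-- format_vicuna_1_1 = "{system_message}\nUSER: {user_message}\nASSISTANT: "
--
-- format_vicuna_1_1_no_sysmessage = "USER: {user_message}\nASSISTANT: "
--
-- format_alpaca = "{system_message}\n\n### Instruction:\n{user_message}\n\n### Response:\n"
--
-- format_alpaca_no_sysmessage = "### Instruction:\n{user_message}\n\n### Response:\n"
--
-- format_beluga = "### System:\n{system_message}\n\n### User:\n{user_message}\n\n### Assistant:\n"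
--
-- format_beluga_no_sysmessage = "### User: {user_message}\n\n### Assistant:\n"
--
-- format_dummy = "{system_message}\n\n{user_message}\n\n"
--
-- format_dummy_no_sysmessage = "{user_message}\n\n"
--
-- def map_llmname_input_format(llm_name, user_message, system_message=None, response=None):
--
--     assert user_message is not None
--     if system_message is not None:
--         system_message = system_message.strip(' ')
--
--     llm_name = llm_name.lower()
--
--     if any(x in llm_name for x in ['hermes-llama-2','hermes-llama2','yi','alpaca', 'guanaco']):
--         if system_message is not None:
--             template = format_alpaca
--         else:
--             template = format_alpaca_no_sysmessage
--
--     elif any(x in llm_name for x in ['vicuna', 'lazarus', 'minotaur']):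
--         if system_message is not None:
--             template = format_vicuna_1_1
--         else:
--             template = format_vicuna_1_1_no_sysmessage
--
--     elif any( x in llm_name for x in ['beluga','llama-2-70b-instruct-v2', 'llama-30b-instruct-2048', 'llama-3.2-1b-instruct', 'llama-3.2-3b-instruct', 'llama-3.1-8b-instruct', 'llama-3.1-70b-instruct']):
--         if system_message is not None:
--             template = format_beluga
--         else:
--             template = format_beluga_no_sysmessage
--
--     elif any(x in llm_name for x in ['dummy', 'test']) :
--         if system_message is not None:
--             template = format_dummy
--         else:
--             template = format_dummy_no_sysmessage
--
--
--     else: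
--         raise ValueError(f'Unknown llm_name: {llm_name}')
--
--     if system_message is not None:
--         template = template.format(system_message=system_message, user_message=user_message)
--     else:
--         template = template.format(user_message=user_message)
--
--     # Adding response
--     if response is not None:
--         template += response
--
--     return template
-- ===== SOURCE B (Python) =====
-- # Different mechanism than A's ordered if/elif over keyword groups: a flat keyword->family
-- # map; collect the family indices of ALL matching keywords and take their MINIMUM (family
-- # order encodes A's group priority); the chosen message is then assembled from a per-family
-- # segment table by one generic join, with no template strings and no str.format.
--
-- _KW = {
--     'hermes-llama-2': 0, 'hermes-llama2': 0, 'yi': 0, 'alpaca': 0, 'guanaco': 0,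
--     'vicuna': 1, 'lazarus': 1, 'minotaur': 1,
--     'beluga': 2, 'llama-2-70b-instruct-v2': 2, 'llama-30b-instruct-2048': 2,
--     'llama-3.2-1b-instruct': 2, 'llama-3.2-3b-instruct': 2,
--     'llama-3.1-8b-instruct': 2, 'llama-3.1-70b-instruct': 2,
--     'dummy': 3, 'test': 3,
-- }
--
-- # per family: (sys_head, sys_mid, nosys_head, tail)
-- _SEG = [
--     ('', '\n\n### Instruction:\n', '### Instruction:\n', '\n\n### Response:\n'),
--     ('', '\nUSER: ', 'USER: ', '\nASSISTANT: '),
--     ('### System:\n', '\n\n### User:\n', '### User: ', '\n\n### Assistant:\n'),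
--     ('', '\n\n', '', '\n\n'),
-- ]
--
--
-- def map_llmname_input_format(llm_name, user_message, system_message=None, response=None):
--     assert user_message is not None
--     name = llm_name.lower()
--     fams = [f for k, f in _KW.items() if k in name]
--     if not fams:
--         raise ValueError(f'Unknown llm_name: {llm_name}')
--     sys_head, sys_mid, nosys_head, tail = _SEG[min(fams)]
--     if system_message is not None:
--         parts = [sys_head, system_message.strip(' '), sys_mid, user_message, tail]
--     else:
--         parts = [nosys_head, user_message, tail]
--     if response is not None:
--         parts.append(response)
--     return ''.join(parts)
-- ===== Notes on version B (the rewrite author's own statement) =====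
-- stated objective: alternative
-- what changed: Replaces A's ordered if/elif over keyword groups with str.format templates by a flat keyword-to-family map whose minimum matching family index selects a row of a literal-segment table assembled by one join (no templates, no format).
import Mathlib
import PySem

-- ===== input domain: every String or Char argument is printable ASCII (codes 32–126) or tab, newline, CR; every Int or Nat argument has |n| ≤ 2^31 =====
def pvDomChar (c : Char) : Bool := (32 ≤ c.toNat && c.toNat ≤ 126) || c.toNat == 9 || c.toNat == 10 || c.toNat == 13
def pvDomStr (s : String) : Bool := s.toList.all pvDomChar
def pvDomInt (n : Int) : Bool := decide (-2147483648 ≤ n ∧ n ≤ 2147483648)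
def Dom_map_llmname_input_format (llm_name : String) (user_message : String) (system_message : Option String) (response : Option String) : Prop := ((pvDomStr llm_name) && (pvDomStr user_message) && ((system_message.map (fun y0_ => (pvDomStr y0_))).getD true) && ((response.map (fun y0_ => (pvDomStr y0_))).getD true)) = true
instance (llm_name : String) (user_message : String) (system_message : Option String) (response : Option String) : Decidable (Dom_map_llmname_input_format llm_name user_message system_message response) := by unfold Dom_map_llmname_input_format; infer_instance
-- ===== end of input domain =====

-- B replaces A's ordered if/elif over keyword groups (+ str.format templates) by a flat
-- keyword→family map whose MINIMUM matching family index picks a row of a segment table,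
-- assembled by one generic join: an alternative mechanism, same cost.  Both raise
-- ValueError on an unmatched name; Pre_ excludes exactly those inputs.

-- ===== PORT A =====
-- module-level template constants of Source A
def format_vicuna_1_1 : String := "{system_message}\nUSER: {user_message}\nASSISTANT: "
def format_vicuna_1_1_no_sysmessage : String := "USER: {user_message}\nASSISTANT: "
def format_alpaca : String := "{system_message}\n\n### Instruction:\n{user_message}\n\n### Response:\n"
def format_alpaca_no_sysmessage : String := "### Instruction:\n{user_message}\n\n### Response:\n"
def format_beluga : String := "### System:\n{system_message}\n\n### User:\n{user_message}\n\n### Assistant:\n"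
def format_beluga_no_sysmessage : String := "### User: {user_message}\n\n### Assistant:\n"
def format_dummy : String := "{system_message}\n\n{user_message}\n\n"
def format_dummy_no_sysmessage : String := "{user_message}\n\n"

-- Hand port (no PySem primitive) of str.format for templates whose only replacement
-- fields are the bare names {system_message} / {user_message} — true of all eight
-- constants above.  The template is scanned left to right, each {field} replaced by the
-- named argument; substituted values are NOT re-scanned, exactly as str.format does.
-- An unknown or missing field would be a KeyError in Python; unreachable for these
-- templates (the no-sys constants contain no {system_message}), rendered as [].
def pyFormatGo (cs : List Char) (cur : List Char) (inBrace : Bool)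
    (sm : Option (List Char)) (um : List Char) : List Char :=
  match cs with
  | [] => []
  | c :: rest =>
    if inBrace then
      if c = '}' then
        (if cur = "system_message".toList then sm.getD []
         else if cur = "user_message".toList then um else []) ++ pyFormatGo rest [] false sm um
      else pyFormatGo rest (cur ++ [c]) true sm um
    else if c = '{' then pyFormatGo rest [] true sm um
    else c :: pyFormatGo rest cur false sm um

def map_llmname_input_format (llm_name : String) (user_message : String) (system_message : Option String) (response : Option String) : String :=
  let system_message := system_message.map (fun s => PySem.Str.stripChars s " ")
  let llm_name := PySem.Str.lower llm_name
  let template? : Option String :=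
    if ["hermes-llama-2","hermes-llama2","yi","alpaca","guanaco"].any (fun x => PySem.Str.isIn x llm_name) then
      some (match system_message with | some _ => format_alpaca | none => format_alpaca_no_sysmessage)
    else if ["vicuna","lazarus","minotaur"].any (fun x => PySem.Str.isIn x llm_name) then
      some (match system_message with | some _ => format_vicuna_1_1 | none => format_vicuna_1_1_no_sysmessage)
    else if ["beluga","llama-2-70b-instruct-v2","llama-30b-instruct-2048","llama-3.2-1b-instruct","llama-3.2-3b-instruct","llama-3.1-8b-instruct","llama-3.1-70b-instruct"].any (fun x => PySem.Str.isIn x llm_name) then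
      some (match system_message with | some _ => format_beluga | none => format_beluga_no_sysmessage)
    else if ["dummy","test"].any (fun x => PySem.Str.isIn x llm_name) then
      some (match system_message with | some _ => format_dummy | none => format_dummy_no_sysmessage)
    else none      -- raise ValueError(f'Unknown llm_name: {llm_name}'); excluded by Pre_
  match template? with
  | none => ""     -- unreachable under Pre_map_llmname_input_format
  | some tpl =>
    let t : List Char :=
      match system_message with
      | some sm => pyFormatGo tpl.toList [] false (some sm.toList) user_message.toList
      | none    => pyFormatGo tpl.toList [] false none user_message.toList
    let t : List Char :=
      match response with
      | some r => t ++ r.toList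
      | none   => t
    String.ofList t

-- ===== PORT B =====
-- Source B's flat keyword → family-index dict _KW (association list, insertion order)
def pvKW : List (String × Int) :=
  [("hermes-llama-2", 0), ("hermes-llama2", 0), ("yi", 0), ("alpaca", 0), ("guanaco", 0),
   ("vicuna", 1), ("lazarus", 1), ("minotaur", 1),
   ("beluga", 2), ("llama-2-70b-instruct-v2", 2), ("llama-30b-instruct-2048", 2),
   ("llama-3.2-1b-instruct", 2), ("llama-3.2-3b-instruct", 2),
   ("llama-3.1-8b-instruct", 2), ("llama-3.1-70b-instruct", 2),
   ("dummy", 3), ("test", 3)]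

-- Source B's segment table _SEG: per family (sys_head, sys_mid, nosys_head, tail)
def pvSEG : List (String × String × String × String) :=
  [("", "\n\n### Instruction:\n", "### Instruction:\n", "\n\n### Response:\n"),
   ("", "\nUSER: ", "USER: ", "\nASSISTANT: "),
   ("### System:\n", "\n\n### User:\n", "### User: ", "\n\n### Assistant:\n"),
   ("", "\n\n", "", "\n\n")]

def map_llmname_input_format_alt (llm_name : String) (user_message : String) (system_message : Option String) (response : Option String) : String :=
  let name := PySem.Str.lower llm_name
  -- fams = [f for k, f in _KW.items() if k in name]
  let fams : List Int := pvKW.filterMap (fun kf => if PySem.Str.isIn kf.1 name then some kf.2 else none)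
  match fams with
  | [] => ""     -- raise ValueError(f'Unknown llm_name: {llm_name}'); excluded by Pre_
  | f :: rest =>
    let fmin : Int := rest.foldl min f                       -- min(fams)
    let seg := (PySem.List.pyGet? pvSEG fmin).getD ("", "", "", "")   -- _SEG[min(fams)], always in range
    let parts : List String :=
      match system_message with
      | some sm => [seg.1, PySem.Str.stripChars sm " ", seg.2.1, user_message, seg.2.2.2]
      | none    => [seg.2.2.1, user_message, seg.2.2.2]
    let parts : List String :=
      match response with
      | some r => parts ++ [r]
      | none   => parts
    PySem.Str.join "" parts

-- ===== PRECONDITION & SPEC =====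
-- Pre_ excludes exactly the names matching no keyword, on which A (and B) raise ValueError.
def Pre_map_llmname_input_format (llm_name : String) (user_message : String) (system_message : Option String) (response : Option String) : Prop :=
  (pvKW.any (fun kf => PySem.Str.isIn kf.1 (PySem.Str.lower llm_name))) = true
instance (llm_name : String) (user_message : String) (system_message : Option String) (response : Option String) : Decidable (Pre_map_llmname_input_format llm_name user_message system_message response) := by unfold Pre_map_llmname_input_format; infer_instance

def pvWitness_map_llmname_input_format : String × String × Option String × Option String :=
  ("Alpaca-7B", "hello", some " sys ", some "ok")

def Spec_map_llmname_input_format (llm_name : String) (user_message : String) (system_message : Option String) (response : Option String) (out : String) : Prop := out = map_llmname_input_format_alt llm_name user_message system_message response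
instance (llm_name : String) (user_message : String) (system_message : Option String) (response : Option String) (out : String) : Decidable (Spec_map_llmname_input_format llm_name user_message system_message response out) := by unfold Spec_map_llmname_input_format; infer_instance

-- ===== CLAIM (what is proved, stated in full; the proofs are below) =====
def Claim_equal_map_llmname_input_format : Prop := ∀ (llm_name : String) (user_message : String) (system_message : Option String) (response : Option String), Dom_map_llmname_input_format llm_name user_message system_message response → Pre_map_llmname_input_format llm_name user_message system_message response → Spec_map_llmname_input_format llm_name user_message system_message response (map_llmname_input_format llm_name user_message system_message response)

-- ===== LEMMAS AND PROOFS =====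

-- the four keyword groups, in A's order
def pvG0 : List String := ["hermes-llama-2","hermes-llama2","yi","alpaca","guanaco"]
def pvG1 : List String := ["vicuna","lazarus","minotaur"]
def pvG2 : List String := ["beluga","llama-2-70b-instruct-v2","llama-30b-instruct-2048","llama-3.2-1b-instruct","llama-3.2-3b-instruct","llama-3.1-8b-instruct","llama-3.1-70b-instruct"]
def pvG3 : List String := ["dummy","test"]

theorem pvKW_eq : pvKW = pvG0.map (fun k => (k, (0:Int))) ++ pvG1.map (fun k => (k, 1))
    ++ pvG2.map (fun k => (k, 2)) ++ pvG3.map (fun k => (k, 3)) := rfl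

-- filterMap over a constant-family segment
theorem pvFmSeg (kws : List String) (v : Int) (name : String) :
    (kws.map (fun k => (k, v))).filterMap
      (fun kf => if PySem.Str.isIn kf.1 name then some kf.2 else none)
    = (kws.filter (fun k => PySem.Str.isIn k name)).map (fun _ => v) := by
  induction kws with
  | nil => rfl
  | cons k t ih =>
    simp only [List.map_cons, List.filterMap_cons, List.filter_cons]
    by_cases h : PySem.Str.isIn k name = true
    · simp only [h, if_true, ih, List.map_cons]
    · simp only [eq_false_of_ne_true h, if_false, Bool.false_eq_true, ih]

theorem pvFilterNil (kws : List String) (name : String)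
    (h : kws.any (fun x => PySem.Str.isIn x name) = false) :
    kws.filter (fun k => PySem.Str.isIn k name) = [] := by
  simp only [List.any_eq_false] at h
  simp only [List.filter_eq_nil_iff]
  intro k hk
  simpa using h k hk

theorem pvFoldlMinMem (l : List Int) (f : Int) : l.foldl min f ∈ f :: l := by
  induction l generalizing f with
  | nil => simp
  | cons a t ih =>
    have h := ih (min f a)
    rcases min_choice f a with hc | hc <;> simp only [List.foldl] <;> rw [hc] at h ⊢ <;>
      simp at h ⊢ <;> tauto

theorem pvFoldlMinLe (l : List Int) (f : Int) : ∀ x ∈ f :: l, l.foldl min f ≤ x := by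
  induction l generalizing f with
  | nil => intro x hx; simp_all
  | cons a t ih =>
    intro x hx
    simp only [List.foldl_cons]
    have hbase : t.foldl min (min f a) ≤ min f a := ih (min f a) (min f a) (by simp)
    rcases List.mem_cons.mp hx with rfl | hx'
    · exact le_trans hbase (min_le_left _ _)
    · rcases List.mem_cons.mp hx' with rfl | hx''
      · exact le_trans hbase (min_le_right _ _)
      · exact ih (min f a) x (by simp [hx''])

theorem pvMinEq (l : List Int) (f m : Int) (hmem : m ∈ f :: l)
    (hlb : ∀ x ∈ f :: l, m ≤ x) : l.foldl min f = m :=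
  le_antisymm (pvFoldlMinLe l f m hmem) (hlb _ (pvFoldlMinMem l f))

theorem pvOfListAppend (l : List Char) (r : String) :
    String.ofList (l ++ r.toList) = String.ofList l ++ r := by
  apply String.toList_inj.mp; simp

set_option maxRecDepth 4096 in
theorem pvFmtA (s u : String) : String.ofList (pyFormatGo format_alpaca.toList [] false (some s.toList) u.toList) = s ++ "\n\n### Instruction:\n" ++ u ++ "\n\n### Response:\n" := by
  apply String.toList_inj.mp; simp [String.toList_append]; rfl

theorem pvFmtAn (u : String) : String.ofList (pyFormatGo format_alpaca_no_sysmessage.toList [] false none u.toList) = "### Instruction:\n" ++ u ++ "\n\n### Response:\n" := by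
  apply String.toList_inj.mp; simp [String.toList_append]; rfl

theorem pvFmtV (s u : String) : String.ofList (pyFormatGo format_vicuna_1_1.toList [] false (some s.toList) u.toList) = s ++ "\nUSER: " ++ u ++ "\nASSISTANT: " := by
  apply String.toList_inj.mp; simp [String.toList_append]; rfl

theorem pvFmtVn (u : String) : String.ofList (pyFormatGo format_vicuna_1_1_no_sysmessage.toList [] false none u.toList) = "USER: " ++ u ++ "\nASSISTANT: " := by
  apply String.toList_inj.mp; simp [String.toList_append]; rfl

set_option maxRecDepth 4096 in
theorem pvFmtB (s u : String) : String.ofList (pyFormatGo format_beluga.toList [] false (some s.toList) u.toList) = "### System:\n" ++ s ++ "\n\n### User:\n" ++ u ++ "\n\n### Assistant:\n" := by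
  apply String.toList_inj.mp; simp [String.toList_append]; rfl

theorem pvFmtBn (u : String) : String.ofList (pyFormatGo format_beluga_no_sysmessage.toList [] false none u.toList) = "### User: " ++ u ++ "\n\n### Assistant:\n" := by
  apply String.toList_inj.mp; simp [String.toList_append]; rfl

theorem pvFmtD (s u : String) : String.ofList (pyFormatGo format_dummy.toList [] false (some s.toList) u.toList) = s ++ "\n\n" ++ u ++ "\n\n" := by
  apply String.toList_inj.mp; simp [String.toList_append]; rfl

theorem pvFmtDn (u : String) : String.ofList (pyFormatGo format_dummy_no_sysmessage.toList [] false none u.toList) = u ++ "\n\n" := by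
  apply String.toList_inj.mp; simp [String.toList_append]; rfl

-- first-cons decomposition of a matched group's filter
theorem pvFilterCons (kws : List String) (name : String)
    (h : kws.any (fun x => PySem.Str.isIn x name) = true) :
    ∃ k ks, kws.filter (fun k => PySem.Str.isIn k name) = k :: ks := by
  rcases hfe : kws.filter (fun k => PySem.Str.isIn k name) with _ | ⟨k, ks⟩
  · exfalso
    obtain ⟨x, hx, hpx⟩ := List.any_eq_true.mp h
    have hm : x ∈ kws.filter (fun k => PySem.Str.isIn k name) := List.mem_filter.mpr ⟨hx, hpx⟩
    rw [hfe] at hm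
    exact absurd hm (List.not_mem_nil)
  · exact ⟨k, ks, rfl⟩

-- ===== VERDICT (by name: the statement is the Claim_ definition above) =====
set_option maxHeartbeats 2000000 in
theorem map_llmname_input_format_spec : Claim_equal_map_llmname_input_format := by
  intro n um sm resp _dom hpre
  unfold Spec_map_llmname_input_format map_llmname_input_format map_llmname_input_format_alt
  rw [pvKW_eq]
  simp only [List.filterMap_append, pvFmSeg, pvG0, pvG1, pvG2, pvG3]
  by_cases h1 : (["hermes-llama-2","hermes-llama2","yi","alpaca","guanaco"].any (fun x => PySem.Str.isIn x (PySem.Str.lower n))) = true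
  · obtain ⟨k, ks, hks⟩ := pvFilterCons _ _ h1
    rw [if_pos h1, hks]
    simp only [List.map_cons, List.cons_append]
    rw [pvMinEq _ _ 0 (List.mem_cons_self) (by
      intro x hx
      rcases List.mem_cons.mp hx with rfl | hx'
      · exact le_refl 0
      · simp only [List.mem_append, List.mem_map] at hx'
        rcases hx' with ((⟨_, _, rfl⟩ | ⟨_, _, rfl⟩) | ⟨_, _, rfl⟩) | ⟨_, _, rfl⟩ <;> omega)]
    simp only [PySem.List.pyGet?, PySem.List.pyIdx?, pvSEG]
    rcases sm with _ | s <;> rcases resp with _ | r <;>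
      simp only [Option.map_some, Option.map_none]
    · rw [pvFmtAn]
      apply String.toList_inj.mp
      simp [PySem.Chars.join, List.intercalate, List.intersperse, String.toList_append]
    · rw [pvOfListAppend, pvFmtAn]
      apply String.toList_inj.mp
      simp [PySem.Chars.join, List.intercalate, List.intersperse, String.toList_append]
    · rw [pvFmtA]
      apply String.toList_inj.mp
      simp [PySem.Chars.join, List.intercalate, List.intersperse, String.toList_append]
    · rw [pvOfListAppend, pvFmtA]
      apply String.toList_inj.mp
      simp [PySem.Chars.join, List.intercalate, List.intersperse, String.toList_append]
  rw [if_neg h1, pvFilterNil _ _ (eq_false_of_ne_true h1)]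
  by_cases h2 : (["vicuna","lazarus","minotaur"].any (fun x => PySem.Str.isIn x (PySem.Str.lower n))) = true
  · obtain ⟨k, ks, hks⟩ := pvFilterCons _ _ h2
    rw [if_pos h2, hks]
    simp only [List.map_cons, List.cons_append, List.map_nil, List.nil_append]
    rw [pvMinEq _ _ 1 (List.mem_cons_self) (by
      intro x hx
      rcases List.mem_cons.mp hx with rfl | hx'
      · exact le_refl 1
      · simp only [List.mem_append, List.mem_map] at hx'
        rcases hx' with (⟨_, _, rfl⟩ | ⟨_, _, rfl⟩) | ⟨_, _, rfl⟩ <;> omega)]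
    simp only [PySem.List.pyGet?, PySem.List.pyIdx?, pvSEG]
    rcases sm with _ | s <;> rcases resp with _ | r <;>
      simp only [Option.map_some, Option.map_none]
    · rw [pvFmtVn]
      apply String.toList_inj.mp
      simp [PySem.Chars.join, List.intercalate, List.intersperse, String.toList_append]
    · rw [pvOfListAppend, pvFmtVn]
      apply String.toList_inj.mp
      simp [PySem.Chars.join, List.intercalate, List.intersperse, String.toList_append]
    · rw [pvFmtV]
      apply String.toList_inj.mp
      simp [PySem.Chars.join, List.intercalate, List.intersperse, String.toList_append]
    · rw [pvOfListAppend, pvFmtV]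
      apply String.toList_inj.mp
      simp [PySem.Chars.join, List.intercalate, List.intersperse, String.toList_append]
  rw [if_neg h2, pvFilterNil _ _ (eq_false_of_ne_true h2)]
  by_cases h3 : (["beluga","llama-2-70b-instruct-v2","llama-30b-instruct-2048","llama-3.2-1b-instruct","llama-3.2-3b-instruct","llama-3.1-8b-instruct","llama-3.1-70b-instruct"].any (fun x => PySem.Str.isIn x (PySem.Str.lower n))) = true
  · obtain ⟨k, ks, hks⟩ := pvFilterCons _ _ h3
    rw [if_pos h3, hks]
    simp only [List.map_cons, List.cons_append, List.map_nil, List.nil_append]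
    rw [pvMinEq _ _ 2 (List.mem_cons_self) (by
      intro x hx
      rcases List.mem_cons.mp hx with rfl | hx'
      · exact le_refl 2
      · simp only [List.mem_append, List.mem_map] at hx'
        rcases hx' with ⟨_, _, rfl⟩ | ⟨_, _, rfl⟩ <;> omega)]
    simp only [PySem.List.pyGet?, PySem.List.pyIdx?, pvSEG]
    rcases sm with _ | s <;> rcases resp with _ | r <;>
      simp only [Option.map_some, Option.map_none]
    · rw [pvFmtBn]
      apply String.toList_inj.mp
      simp [PySem.Chars.join, List.intercalate, List.intersperse, String.toList_append]
    · rw [pvOfListAppend, pvFmtBn]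
      apply String.toList_inj.mp
      simp [PySem.Chars.join, List.intercalate, List.intersperse, String.toList_append]
    · rw [pvFmtB]
      apply String.toList_inj.mp
      simp [PySem.Chars.join, List.intercalate, List.intersperse, String.toList_append]
    · rw [pvOfListAppend, pvFmtB]
      apply String.toList_inj.mp
      simp [PySem.Chars.join, List.intercalate, List.intersperse, String.toList_append]
  rw [if_neg h3, pvFilterNil _ _ (eq_false_of_ne_true h3)]
  by_cases h4 : (["dummy","test"].any (fun x => PySem.Str.isIn x (PySem.Str.lower n))) = true
  · obtain ⟨k, ks, hks⟩ := pvFilterCons _ _ h4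
    rw [if_pos h4, hks]
    simp only [List.map_cons, List.cons_append, List.map_nil, List.nil_append]
    rw [pvMinEq _ _ 3 (List.mem_cons_self) (by
      intro x hx
      rcases List.mem_cons.mp hx with rfl | hx'
      · exact le_refl 3
      · simp only [List.mem_map] at hx'
        obtain ⟨_, _, rfl⟩ := hx'
        omega)]
    simp only [PySem.List.pyGet?, PySem.List.pyIdx?, pvSEG]
    rcases sm with _ | s <;> rcases resp with _ | r <;>
      simp only [Option.map_some, Option.map_none]
    · rw [pvFmtDn]
      apply String.toList_inj.mp
      simp [PySem.Chars.join, List.intercalate, List.intersperse, String.toList_append]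
    · rw [pvOfListAppend, pvFmtDn]
      apply String.toList_inj.mp
      simp [PySem.Chars.join, List.intercalate, List.intersperse, String.toList_append]
    · rw [pvFmtD]
      apply String.toList_inj.mp
      simp [PySem.Chars.join, List.intercalate, List.intersperse, String.toList_append]
    · rw [pvOfListAppend, pvFmtD]
      apply String.toList_inj.mp
      simp [PySem.Chars.join, List.intercalate, List.intersperse, String.toList_append]
  -- no group matched: contradiction with Pre_
  exfalso
  apply h4
  unfold Pre_map_llmname_input_format at hpre
  rw [pvKW_eq] at hpre
  simp only [List.any_append, List.any_map, Bool.or_eq_true, pvG0, pvG1, pvG2, pvG3] at hpre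
  rcases hpre with ((hp | hp) | hp) | hp
  · exact absurd hp h1
  · exact absurd hp h2
  · exact absurd hp h3
  · exact hp
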